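-- pv_equiv track=rewrite | github.com/squoilin/TIMES_PyPSA | scripts/sankey_diagram.py | _generate_node_colors
-- ===== SOURCE A (Python) =====
-- def _generate_node_colors(nodes):
--     """Generate colors for energy nodes"""
--     colors = []
--     for node in nodes:
--         node_lower = node.lower()
--         if 'coal' in node_lower:
--             colors.append('rgba(139,69,19,0.8)')  # Brown
--         elif 'gas' in node_lower:
--             colors.append('rgba(0,0,255,0.8)')    # Blue
--         elif 'nuclear' in node_lower or 'uranium' in node_lower:
--             colors.append('rgba(255,0,0,0.8)')    # Red
--         elif 'oil' in node_lower:
--             colors.append('rgba(0,0,0,0.8)')      # Black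
--         elif 'renewable' in node_lower or 'rnw' in node_lower:
--             colors.append('rgba(0,255,0,0.8)')    # Green
--         elif 'electricity' in node_lower:
--             colors.append('rgba(255,255,0,0.8)')  # Yellow
--         elif 'elc' in node_lower:
--             colors.append('rgba(255,255,0,0.8)')  # Yellow for electricity generation nodes
--         elif 'rsd' in node_lower:
--             colors.append('rgba(0,0,255,0.8)')    # Blue for residential gas
--         elif 'tra' in node_lower:
--             colors.append('rgba(0,0,0,0.8)')      # Black for transport oil
--         elif 'demand' in node_lower or 'heat' in node_lower or 'transport' in node_lower:
--             colors.append('rgba(128,128,128,0.8)') # Gray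
--         elif 'export' in node_lower or 'import' in node_lower:
--             colors.append('rgba(173,216,230,0.8)') # Light blue
--         elif 'resources' in node_lower:
--             colors.append('rgba(160,82,45,0.8)')   # Saddle brown for resource nodes
--         else:
--             colors.append('rgba(128,128,128,0.8)') # Default gray
--     return colors
-- ===== SOURCE B (Python) =====
-- _RULES = [
--     (('coal',), 'rgba(139,69,19,0.8)'),
--     (('gas',), 'rgba(0,0,255,0.8)'),
--     (('nuclear', 'uranium'), 'rgba(255,0,0,0.8)'),
--     (('oil',), 'rgba(0,0,0,0.8)'),
--     (('renewable', 'rnw'), 'rgba(0,255,0,0.8)'),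
--     (('electricity',), 'rgba(255,255,0,0.8)'),
--     (('elc',), 'rgba(255,255,0,0.8)'),
--     (('rsd',), 'rgba(0,0,255,0.8)'),
--     (('tra',), 'rgba(0,0,0,0.8)'),
--     (('demand', 'heat', 'transport'), 'rgba(128,128,128,0.8)'),
--     (('export', 'import'), 'rgba(173,216,230,0.8)'),
--     (('resources',), 'rgba(160,82,45,0.8)'),
-- ]
--
-- _DEFAULT = 'rgba(128,128,128,0.8)'
--
--
-- def _generate_node_colors(nodes):
--     """Generate colors for energy nodes.
--
--     Rule-major staged passes: start every node at the default color, then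
--     sweep the rules from LOWEST to HIGHEST priority, overwriting the color
--     of every node that matches the current rule.  The last overwrite wins,
--     so each node ends with the color of its highest-priority matching rule
--     (= the first match of the original elif chain).
--     """
--     lows = [n.lower() for n in nodes]
--     colors = [_DEFAULT] * len(lows)
--     for keywords, color in reversed(_RULES):
--         for i, low in enumerate(lows):
--             if any(k in low for k in keywords):
--                 colors[i] = color
--     return colors
-- ===== Notes on version B (the rewrite author's own statement) =====
-- stated objective: alternative
-- what changed: Instead of deciding each node's color with a per-node first-match elif chain, B initializes all colors to the default and sweeps the rule table rule-major in reverse priority order, overwriting matching nodes so the last (highest-priority) overwrite wins.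
import Mathlib
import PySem

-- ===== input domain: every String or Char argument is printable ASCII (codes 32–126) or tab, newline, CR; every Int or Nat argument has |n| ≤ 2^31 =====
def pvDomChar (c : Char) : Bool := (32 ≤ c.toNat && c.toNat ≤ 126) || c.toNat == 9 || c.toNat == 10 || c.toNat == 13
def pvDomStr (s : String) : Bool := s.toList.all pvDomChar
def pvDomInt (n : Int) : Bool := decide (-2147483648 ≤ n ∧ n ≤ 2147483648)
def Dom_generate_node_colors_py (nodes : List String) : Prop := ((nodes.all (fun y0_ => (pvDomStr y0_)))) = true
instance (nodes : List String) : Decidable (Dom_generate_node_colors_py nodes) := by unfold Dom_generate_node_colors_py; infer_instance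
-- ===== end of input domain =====

-- B replaces A's per-node first-match elif chain by rule-major staged passes: all colors start at the
-- default and the rule table is swept in reverse priority order, overwriting matching nodes (alternative
-- decomposition, same cost; return-value equivalence only).

-- ===== PORT A =====
def generate_node_colors_py (nodes : List String) : List String :=
  nodes.foldl (fun colors node =>
    let node_lower := PySem.Str.lower node
    if PySem.Str.isIn "coal" node_lower then colors ++ ["rgba(139,69,19,0.8)"]
    else if PySem.Str.isIn "gas" node_lower then colors ++ ["rgba(0,0,255,0.8)"]
    else if PySem.Str.isIn "nuclear" node_lower || PySem.Str.isIn "uranium" node_lower then colors ++ ["rgba(255,0,0,0.8)"]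
    else if PySem.Str.isIn "oil" node_lower then colors ++ ["rgba(0,0,0,0.8)"]
    else if PySem.Str.isIn "renewable" node_lower || PySem.Str.isIn "rnw" node_lower then colors ++ ["rgba(0,255,0,0.8)"]
    else if PySem.Str.isIn "electricity" node_lower then colors ++ ["rgba(255,255,0,0.8)"]
    else if PySem.Str.isIn "elc" node_lower then colors ++ ["rgba(255,255,0,0.8)"]
    else if PySem.Str.isIn "rsd" node_lower then colors ++ ["rgba(0,0,255,0.8)"]
    else if PySem.Str.isIn "tra" node_lower then colors ++ ["rgba(0,0,0,0.8)"]
    else if PySem.Str.isIn "demand" node_lower || PySem.Str.isIn "heat" node_lower || PySem.Str.isIn "transport" node_lower then colors ++ ["rgba(128,128,128,0.8)"]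
    else if PySem.Str.isIn "export" node_lower || PySem.Str.isIn "import" node_lower then colors ++ ["rgba(173,216,230,0.8)"]
    else if PySem.Str.isIn "resources" node_lower then colors ++ ["rgba(160,82,45,0.8)"]
    else colors ++ ["rgba(128,128,128,0.8)"]) []

-- ===== PORT B =====
def colorRules : List (List String × String) :=
  [ (["coal"], "rgba(139,69,19,0.8)"),
    (["gas"], "rgba(0,0,255,0.8)"),
    (["nuclear", "uranium"], "rgba(255,0,0,0.8)"),
    (["oil"], "rgba(0,0,0,0.8)"),
    (["renewable", "rnw"], "rgba(0,255,0,0.8)"),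
    (["electricity"], "rgba(255,255,0,0.8)"),
    (["elc"], "rgba(255,255,0,0.8)"),
    (["rsd"], "rgba(0,0,255,0.8)"),
    (["tra"], "rgba(0,0,0,0.8)"),
    (["demand", "heat", "transport"], "rgba(128,128,128,0.8)"),
    (["export", "import"], "rgba(173,216,230,0.8)"),
    (["resources"], "rgba(160,82,45,0.8)") ]

def defaultColor : String := "rgba(128,128,128,0.8)"

-- 'for i, low in enumerate(lows): if any(...): colors[i] = color' — the positional update of the
-- colors array is transcribed as a zipWith of the (lows, colors) columns.
def generate_node_colors_py_alt (nodes : List String) : List String :=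
  let lows := nodes.map PySem.Str.lower
  colorRules.reverse.foldl
    (fun colors r =>
      List.zipWith (fun low c => if r.1.any (fun k => PySem.Str.isIn k low) then r.2 else c) lows colors)
    (lows.map (fun _ => defaultColor))

-- ===== PRECONDITION & SPEC =====
def Spec_generate_node_colors_py (nodes : List String) (out : List String) : Prop := out = generate_node_colors_py_alt nodes
instance (nodes : List String) (out : List String) : Decidable (Spec_generate_node_colors_py nodes out) := by unfold Spec_generate_node_colors_py; infer_instance

-- ===== CLAIM (what is proved, stated in full; the proofs are below) =====
def Claim_equal_generate_node_colors_py : Prop := ∀ (nodes : List String), Dom_generate_node_colors_py nodes → Spec_generate_node_colors_py nodes (generate_node_colors_py nodes)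

-- ===== LEMMAS AND PROOFS =====
set_option maxHeartbeats 2000000

-- A's per-node branch chain, factored out for the proof (same shape as A's loop body, returning the color)
def chainColor (node : String) : String :=
  let node_lower := PySem.Str.lower node
  if PySem.Str.isIn "coal" node_lower then "rgba(139,69,19,0.8)"
  else if PySem.Str.isIn "gas" node_lower then "rgba(0,0,255,0.8)"
  else if PySem.Str.isIn "nuclear" node_lower || PySem.Str.isIn "uranium" node_lower then "rgba(255,0,0,0.8)"
  else if PySem.Str.isIn "oil" node_lower then "rgba(0,0,0,0.8)"
  else if PySem.Str.isIn "renewable" node_lower || PySem.Str.isIn "rnw" node_lower then "rgba(0,255,0,0.8)"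
  else if PySem.Str.isIn "electricity" node_lower then "rgba(255,255,0,0.8)"
  else if PySem.Str.isIn "elc" node_lower then "rgba(255,255,0,0.8)"
  else if PySem.Str.isIn "rsd" node_lower then "rgba(0,0,255,0.8)"
  else if PySem.Str.isIn "tra" node_lower then "rgba(0,0,0,0.8)"
  else if PySem.Str.isIn "demand" node_lower || PySem.Str.isIn "heat" node_lower || PySem.Str.isIn "transport" node_lower then "rgba(128,128,128,0.8)"
  else if PySem.Str.isIn "export" node_lower || PySem.Str.isIn "import" node_lower then "rgba(173,216,230,0.8)"
  else if PySem.Str.isIn "resources" node_lower then "rgba(160,82,45,0.8)"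
  else "rgba(128,128,128,0.8)"

-- B's per-node result: the reverse-priority overwrite fold restricted to one node
def overwriteColor (low : String) : String :=
  colorRules.reverse.foldl
    (fun c r => if r.1.any (fun k => PySem.Str.isIn k low) then r.2 else c)
    defaultColor

-- column-wise view of B's rule-major fold: a fold of zipWith over a map is a map of the per-element fold
theorem zipWith_map_self {a b : Type} (f : a → b → b) (h : a → b) (l : List a) :
    List.zipWith f l (l.map h) = l.map (fun x => f x (h x)) := by
  induction l with
  | nil => rfl
  | cons x xs ih => simp only [List.map_cons, List.zipWith_cons_cons, ih]

theorem foldl_zipWith_map (rs : List (List String × String)) (lows : List String)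
    (h : String → String) :
    rs.foldl (fun colors r =>
        List.zipWith (fun low c => if r.1.any (fun k => PySem.Str.isIn k low) then r.2 else c) lows colors)
      (lows.map h)
    = lows.map (fun low =>
        rs.foldl (fun c r => if r.1.any (fun k => PySem.Str.isIn k low) then r.2 else c) (h low)) := by
  induction rs generalizing h with
  | nil => simp
  | cons r rs ih =>
    simp only [List.foldl_cons]
    rw [zipWith_map_self, ih]

-- the reverse-priority overwrite on one node equals A's first-match chain
theorem overwriteColor_eq_chainColor (node : String) :
    overwriteColor (PySem.Str.lower node) = chainColor node := by
  unfold overwriteColor chainColor colorRules defaultColor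
  simp only [List.reverse_cons, List.reverse_nil, List.nil_append, List.cons_append,
    List.foldl_cons, List.foldl_nil, List.any_cons, List.any_nil, Bool.or_false, Bool.or_assoc]

theorem generate_node_colors_eq (nodes : List String) :
    generate_node_colors_py nodes = generate_node_colors_py_alt nodes := by
  unfold generate_node_colors_py generate_node_colors_py_alt
  have hbody : (fun (colors : List String) (node : String) =>
      let node_lower := PySem.Str.lower node
      if PySem.Str.isIn "coal" node_lower then colors ++ ["rgba(139,69,19,0.8)"]
      else if PySem.Str.isIn "gas" node_lower then colors ++ ["rgba(0,0,255,0.8)"]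
      else if PySem.Str.isIn "nuclear" node_lower || PySem.Str.isIn "uranium" node_lower then colors ++ ["rgba(255,0,0,0.8)"]
      else if PySem.Str.isIn "oil" node_lower then colors ++ ["rgba(0,0,0,0.8)"]
      else if PySem.Str.isIn "renewable" node_lower || PySem.Str.isIn "rnw" node_lower then colors ++ ["rgba(0,255,0,0.8)"]
      else if PySem.Str.isIn "electricity" node_lower then colors ++ ["rgba(255,255,0,0.8)"]
      else if PySem.Str.isIn "elc" node_lower then colors ++ ["rgba(255,255,0,0.8)"]
      else if PySem.Str.isIn "rsd" node_lower then colors ++ ["rgba(0,0,255,0.8)"]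
      else if PySem.Str.isIn "tra" node_lower then colors ++ ["rgba(0,0,0,0.8)"]
      else if PySem.Str.isIn "demand" node_lower || PySem.Str.isIn "heat" node_lower || PySem.Str.isIn "transport" node_lower then colors ++ ["rgba(128,128,128,0.8)"]
      else if PySem.Str.isIn "export" node_lower || PySem.Str.isIn "import" node_lower then colors ++ ["rgba(173,216,230,0.8)"]
      else if PySem.Str.isIn "resources" node_lower then colors ++ ["rgba(160,82,45,0.8)"]
      else colors ++ ["rgba(128,128,128,0.8)"]) =
      (fun (colors : List String) (node : String) => colors ++ [chainColor node]) := by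
    funext colors node
    unfold chainColor
    dsimp only
    simp only [apply_ite (fun s : String => colors ++ [s])]
  rw [hbody, PySem.List.foldl_append_singleton_eq_map]
  dsimp only
  rw [foldl_zipWith_map colorRules.reverse (nodes.map PySem.Str.lower) (fun _ => defaultColor),
    List.map_map]
  simp only [List.nil_append]
  apply List.map_congr_left
  intro node _
  exact (overwriteColor_eq_chainColor node).symm

-- ===== VERDICT (by name: the statement is the Claim_ definition above) =====
theorem generate_node_colors_py_spec : Claim_equal_generate_node_colors_py := by
  intro nodes _
  exact generate_node_colors_eq nodes
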